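-- pv_equiv track=rewrite | github.com/Gendo90/topCoder | 400-600 pts/topcoderTwain.py | yearFour
-- ===== SOURCE A (Python) =====
-- def yearFour(words):
--     newWords = []
--     words = words.split(" ")
--     for word in words:
--         this_word = [a for a in word]
--         i = len(this_word)-1
--         while(i>0):
--             if(this_word[i]=="k"):
--                 if(i-1>=0 and (this_word[i-1]=="c")):
--                     this_word.pop(i-1)
--             i-=1
--         this_word = "".join(a for a in this_word)
--         newWords.append(this_word)
--     words = " ".join(newWords)
--     return words
-- ===== SOURCE B (Python) =====
-- def yearFour(words):
--     out = []
--     for ch in words: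
--         if ch == "k":
--             while out and out[-1] == "c":
--                 out.pop()
--         out.append(ch)
--     return "".join(out)
-- ===== Notes on version B (the rewrite author's own statement) =====
-- stated objective: faster
-- what changed: Replaced A's split-into-words plus per-word backward index loop with repeated in-place list.pop calls by a single left-to-right stack pass over the whole string that pops trailing 'c's whenever it meets a 'k'.
import Mathlib
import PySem

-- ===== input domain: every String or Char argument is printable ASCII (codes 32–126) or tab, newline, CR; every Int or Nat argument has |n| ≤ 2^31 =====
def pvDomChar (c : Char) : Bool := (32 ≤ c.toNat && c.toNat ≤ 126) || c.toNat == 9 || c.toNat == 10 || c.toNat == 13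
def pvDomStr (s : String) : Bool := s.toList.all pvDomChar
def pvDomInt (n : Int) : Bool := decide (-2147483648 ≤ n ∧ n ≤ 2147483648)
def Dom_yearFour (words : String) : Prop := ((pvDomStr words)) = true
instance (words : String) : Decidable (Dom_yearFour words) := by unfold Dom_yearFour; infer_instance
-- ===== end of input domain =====

-- B replaces A's per-word backward index loop with repeated in-place pops (O(n²) worst case)
-- by a single left-to-right stack pass over the whole string (O(n)): on 'k' pop trailing 'c's.

-- ===== PORT A =====
-- Python inner while loop: i counts down from len-1; at index i, if word[i]=='k' and
-- word[i-1]=='c' then word.pop(i-1) (always in range since i ≥ 1), then i -= 1.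
-- Ported with i : Nat; Python's initial i = len-1 is -1 on the empty word, where the
-- loop body never runs — identical to starting at Nat 0 here.
def yearFourLoop (L : List Char) : Nat → List Char
  | 0 => L
  | j + 1 =>
    if L[j + 1]? = some 'k' ∧ L[j]? = some 'c' then
      yearFourLoop (L.eraseIdx j) j
    else
      yearFourLoop L j

-- words.split(" "), per-word char list + loop, "".join (identity on the char list),
-- " ".join — all kept on List Char, packed into a String at the end.
def yearFour (words : String) : String :=
  String.ofList (PySem.Chars.join [' ']
    ((PySem.Chars.splitOn words.toList [' ']).map (fun w => yearFourLoop w (w.length - 1))))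

-- ===== PORT B =====
-- port of Source B's inner loop `while out and out[-1] == 'c': out.pop()`: drop trailing 'c's
def popTrailingCs (out : List Char) : List Char :=
  (out.reverse.dropWhile (fun a => a == 'c')).reverse

-- Source B: one pass over the characters with a stack `out`; on 'k' pop trailing 'c's, then
-- always append the character; "".join(out) at the end.
def yearFour_alt (words : String) : String :=
  String.ofList (words.toList.foldl
    (fun out ch => (if ch = 'k' then popTrailingCs out else out) ++ [ch]) [])

-- ===== PRECONDITION & SPEC =====
def Spec_yearFour (words : String) (out : String) : Prop := out = yearFour_alt words
instance (words : String) (out : String) : Decidable (Spec_yearFour words out) := by unfold Spec_yearFour; infer_instance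

-- ===== CLAIM (what is proved, stated in full; the proofs are below) =====
def Claim_equal_yearFour : Prop := ∀ (words : String), Dom_yearFour words → Spec_yearFour words (yearFour words)

-- ===== LEMMAS AND PROOFS =====

-- canonical form: process from the right, dropping a 'c' that sits directly before a 'k'
def ckStep (c : Char) (acc : List Char) : List Char :=
  if c = 'c' ∧ acc.head? = some 'k' then acc else c :: acc

def ckNorm (s : List Char) : List Char := s.foldr ckStep []

-- re-split: structural recurrence equal to PySem.Chars.splitOn on the separator [' ']
def prependPiece (p : List Char) : List (List Char) → List (List Char)
  | [] => [p]
  | h :: t => (p ++ h) :: t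

def mySplit : List Char → List (List Char)
  | [] => [[]]
  | c :: t => if c = ' ' then [] :: mySplit t else prependPiece [c] (mySplit t)

theorem mySplit_ne_nil (l : List Char) : mySplit l ≠ [] := by
  cases l with
  | nil => simp [mySplit]
  | cons c t =>
    simp only [mySplit]
    split_ifs
    · simp
    · cases h : mySplit t <;> simp [prependPiece]

theorem prependPiece_prependPiece (p q : List Char) (r : List (List Char)) :
    prependPiece p (prependPiece q r) = prependPiece (p ++ q) r := by
  cases r <;> simp [prependPiece]

theorem splitOn_go_eq (l : List Char) : ∀ (fuel : Nat) (cur : List Char)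
    (acc : List (List Char)), l.length ≤ fuel →
    PySem.Chars.splitOn.go [' '] fuel l cur acc
      = acc.reverse ++ prependPiece cur.reverse (mySplit l) := by
  induction l with
  | nil =>
    intro fuel cur acc _
    cases fuel <;> simp [PySem.Chars.splitOn.go, mySplit, prependPiece]
  | cons c rest ih =>
    intro fuel cur acc hf
    cases fuel with
    | zero => simp at hf
    | succ f =>
      simp only [PySem.Chars.splitOn.go]
      by_cases hc : c = ' '
      · subst hc
        have hpre : [' '].isPrefixOf (' ' :: rest) = true := by
          simp [List.isPrefixOf]
        rw [if_pos hpre]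
        have hdrop : List.drop [' '].length (' ' :: rest) = rest := rfl
        rw [hdrop]
        simp only [List.length_cons] at hf
        rw [ih f [] (cur.reverse :: acc) (by simpa using Nat.le_of_succ_le_succ hf)]
        obtain ⟨h, t, ht⟩ : ∃ h t, mySplit rest = h :: t := by
          cases hm : mySplit rest with
          | nil => exact absurd hm (mySplit_ne_nil rest)
          | cons h t => exact ⟨h, t, rfl⟩
        simp [mySplit, ht, prependPiece]
      · have hpre : [' '].isPrefixOf (c :: rest) = false := by
          simp [List.isPrefixOf]
          exact fun h => hc h.symm
        rw [if_neg (by simp [hpre])]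
        simp only [List.length_cons] at hf
        rw [ih f (c :: cur) acc (Nat.le_of_succ_le_succ hf)]
        simp [mySplit, hc, prependPiece_prependPiece]

theorem splitOn_eq_mySplit (s : List Char) :
    PySem.Chars.splitOn s [' '] = mySplit s := by
  rw [PySem.Chars.splitOn, splitOn_go_eq s (s.length + 1) [] [] (by omega)]
  obtain ⟨h, t, ht⟩ : ∃ h t, mySplit s = h :: t := by
    cases hm : mySplit s with
    | nil => exact absurd hm (mySplit_ne_nil s)
    | cons h t => exact ⟨h, t, rfl⟩
  simp [ht, prependPiece]

-- A's backward pop-loop over a word equals the right fold with ckStep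
theorem yearFourLoop_eq (X : List Char) : ∀ Y : List Char,
    yearFourLoop (X ++ Y) X.length = X.foldr ckStep Y := by
  induction X using List.reverseRecOn with
  | nil => intro Y; simp [yearFourLoop]
  | append_singleton X c ih =>
    intro Y
    have hlen : (X ++ [c]).length = X.length + 1 := by simp
    rw [hlen]
    have hL : (X ++ [c]) ++ Y = X ++ (c :: Y) := by simp
    rw [hL]
    have hget1 : (X ++ (c :: Y))[X.length + 1]? = Y.head? := by
      rw [List.getElem?_append_right (by omega)]
      simp [List.head?_eq_getElem?]
    have hget0 : (X ++ (c :: Y))[X.length]? = some c := by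
      rw [List.getElem?_append_right (by omega)]
      simp
    have herase : (X ++ (c :: Y)).eraseIdx X.length = X ++ Y := by
      rw [List.eraseIdx_append_of_length_le (by omega)]
      simp
    simp only [yearFourLoop, hget1, hget0, herase, List.foldr_append, List.foldr_cons,
      List.foldr_nil]
    by_cases hk : Y.head? = some 'k' <;> by_cases hc : c = 'c' <;>
      simp [hk, hc, ckStep, ih]

theorem word_eq_ckNorm (w : List Char) :
    yearFourLoop w (w.length - 1) = ckNorm w := by
  induction w using List.reverseRecOn with
  | nil => simp [yearFourLoop, ckNorm]
  | append_singleton X c _ =>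
    have h1 : (X ++ [c]).length - 1 = X.length := by simp
    rw [h1, yearFourLoop_eq X [c], ckNorm, List.foldr_append]
    simp [ckStep]

-- popTrailingCs on a snoc
theorem popTrailingCs_append (x : List Char) (d : Char) :
    popTrailingCs (x ++ [d]) = if d = 'c' then popTrailingCs x else x ++ [d] := by
  simp only [popTrailingCs, List.reverse_append, List.reverse_singleton,
    List.singleton_append, List.dropWhile_cons]
  by_cases hd : d = 'c' <;> simp [hd]

-- ckStep distributes over a ' '-separated tail
theorem ckStep_append_space (c : Char) (x y : List Char) :
    ckStep c (x ++ ' ' :: y) = ckStep c x ++ ' ' :: y := by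
  cases x with
  | nil => simp [ckStep]
  | cons a x' =>
    simp only [List.cons_append, ckStep, List.head?_cons]
    split_ifs with h <;> simp

-- joining the normalised pieces of the split gives the normalisation of the whole string
theorem join_mySplit (s : List Char) :
    PySem.Chars.join [' '] ((mySplit s).map ckNorm) = ckNorm s := by
  induction s with
  | nil => simp [mySplit, ckNorm, PySem.Chars.join_singleton]
  | cons c t ih =>
    by_cases hc : c = ' '
    · subst hc
      obtain ⟨h, r, hm⟩ : ∃ h r, mySplit t = h :: r := by
        cases hm : mySplit t with
        | nil => exact absurd hm (mySplit_ne_nil t)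
        | cons h r => exact ⟨h, r, rfl⟩
      have hsplit : mySplit (' ' :: t) = [] :: mySplit t := by simp [mySplit]
      rw [hsplit, hm, List.map_cons, List.map_cons, PySem.Chars.join_cons_cons,
        ← List.map_cons, ← hm, ih]
      simp [ckNorm, ckStep]
    · obtain ⟨h, r, hm⟩ : ∃ h r, mySplit t = h :: r := by
        cases hm : mySplit t with
        | nil => exact absurd hm (mySplit_ne_nil t)
        | cons h r => exact ⟨h, r, rfl⟩
      have hnorm : ckNorm (c :: t) = ckStep c (ckNorm t) := by simp [ckNorm]
      rw [mySplit, if_neg hc, hm]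
      cases r with
      | nil =>
        rw [hm] at ih
        simp only [List.map_cons, List.map_nil, PySem.Chars.join_singleton] at ih ⊢
        simp only [prependPiece, List.map_cons, List.map_nil, PySem.Chars.join_singleton]
        rw [hnorm, ← ih]
        simp [ckNorm]
      | cons q r' =>
        rw [hm] at ih
        simp only [List.map_cons] at ih
        rw [PySem.Chars.join_cons_cons] at ih
        simp only [prependPiece, List.singleton_append, List.map_cons]
        rw [PySem.Chars.join_cons_cons, hnorm, ← ih]
        have : ckNorm (c :: h) = ckStep c (ckNorm h) := by simp [ckNorm]
        rw [this]
        have hsp : ckNorm h ++ [' '] ++ PySem.Chars.join [' '] (ckNorm q :: List.map ckNorm r')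
            = ckNorm h ++ ' ' :: PySem.Chars.join [' '] (ckNorm q :: List.map ckNorm r') := by
          simp
        rw [hsp, ckStep_append_space]
        simp

-- B's left stack fold equals ckNorm, via a merge invariant
def ckMerge (a r : List Char) : List Char :=
  if r.head? = some 'k' then popTrailingCs a ++ r else a ++ r

theorem foldl_stack_eq (s : List Char) : ∀ a : List Char,
    s.foldl (fun out ch => (if ch = 'k' then popTrailingCs out else out) ++ [ch]) a
      = ckMerge a (ckNorm s) := by
  induction s with
  | nil => intro a; simp [ckNorm, ckMerge]
  | cons c s ih =>
    intro a
    have hnorm : ckNorm (c :: s) = ckStep c (ckNorm s) := by simp [ckNorm]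
    simp only [List.foldl_cons]
    rw [ih, hnorm]
    by_cases hck : c = 'k'
    · subst hck
      have hstep : ckStep 'k' (ckNorm s) = 'k' :: ckNorm s := by
        simp [ckStep]
      rw [hstep]
      by_cases hk : (ckNorm s).head? = some 'k' <;>
        simp [ckMerge, hk, popTrailingCs_append]
    · by_cases hcc : c = 'c'
      · subst hcc
        by_cases hk : (ckNorm s).head? = some 'k'
        · have hstep : ckStep 'c' (ckNorm s) = ckNorm s := by simp [ckStep, hk]
          rw [hstep]
          simp [ckMerge, hk, popTrailingCs_append]
        · have hstep : ckStep 'c' (ckNorm s) = 'c' :: ckNorm s := by simp [ckStep, hk]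
          rw [hstep]
          simp [ckMerge, hk]
      · have hstep : ckStep c (ckNorm s) = c :: ckNorm s := by simp [ckStep, hcc]
        rw [hstep]
        by_cases hk : (ckNorm s).head? = some 'k' <;>
          simp [ckMerge, hk, hck, hcc, popTrailingCs_append]

theorem alt_eq_ckNorm (s : List Char) :
    s.foldl (fun out ch => (if ch = 'k' then popTrailingCs out else out) ++ [ch]) []
      = ckNorm s := by
  rw [foldl_stack_eq]
  by_cases hk : (ckNorm s).head? = some 'k' <;> simp [ckMerge, hk, popTrailingCs]

-- ===== VERDICT (by name: the statement is the Claim_ definition above) =====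
theorem yearFour_spec : Claim_equal_yearFour := by
  intro words _
  show yearFour words = yearFour_alt words
  unfold yearFour yearFour_alt
  rw [splitOn_eq_mySplit, alt_eq_ckNorm, ← join_mySplit]
  congr 1
  congr 1
  exact List.map_congr_left (fun w _ => word_eq_ckNorm w)
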